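-- pv_equiv track=rewrite | github.com/aigents/pygents | papers/distortions_binary_2025/a_api.py | build_ngrams
-- ===== SOURCE A (Python) =====
-- def build_ngrams(seq,N):
--     size = len(seq) - N + 1;
--     if size < 1:
--         return [];
--     items = [];
--     for i in range(0,size):
--         items.append( tuple(seq[i:i+N]) )
--     return items
-- ===== SOURCE B (Python) =====
-- def build_ngrams(seq, N):
--     size = len(seq) - N + 1
--     if size < 1:
--         return []
--     views = ((seq[j] for j in range(i, len(seq))) for i in range(N))
--     return list(zip(*views))
-- ===== Notes on version B (the rewrite author's own statement) =====
-- stated objective: idiomatic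
-- what changed: Replaces the index loop with per-start slicing by the standard zip-of-shifted-views idiom: N offset views of the sequence are consumed in lockstep, emitting each N-gram in one parallel pass.
-- intended difference: For N <= 0 A returns len(seq)-N+1 degenerate tuples (empty or clamped slices, an artefact of Python slice clamping), while B returns [], the intended 'no N-grams exist for non-positive N' answer. — e.g. on build_ngrams([1, 2], 0): A returns [[], [], []], B returns []
import Mathlib
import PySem

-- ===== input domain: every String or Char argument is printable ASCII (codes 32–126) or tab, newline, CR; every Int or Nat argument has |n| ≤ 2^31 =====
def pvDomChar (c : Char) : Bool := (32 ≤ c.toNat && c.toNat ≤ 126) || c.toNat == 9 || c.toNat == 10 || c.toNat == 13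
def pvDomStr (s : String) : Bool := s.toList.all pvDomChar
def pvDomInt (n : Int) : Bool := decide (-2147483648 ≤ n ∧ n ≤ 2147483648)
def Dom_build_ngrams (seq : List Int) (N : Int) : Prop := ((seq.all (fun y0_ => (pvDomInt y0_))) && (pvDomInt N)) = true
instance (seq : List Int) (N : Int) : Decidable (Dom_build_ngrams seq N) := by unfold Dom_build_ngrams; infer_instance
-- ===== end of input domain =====

-- B replaces A's index loop over slice starts by the zip-of-shifted-views idiom (no speed claim);
-- for N ≤ 0 B returns [] where A returns degenerate clamped slices (see D_ below).

-- ===== PORT A =====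
def build_ngrams (seq : List Int) (N : Int) : List (List Int) :=
  let size : Int := seq.length - N + 1
  if size < 1 then []
  else (PySem.List.pyRange 0 size 1).foldl
    (fun items i => items ++ [PySem.List.slice seq (some i) (some (i + N))]) []

-- ===== PORT B =====
-- zip consuming the columns in lockstep: a row is emitted while every column is nonempty
-- (recursion is structural on the first column)
def zipAux : List Int → List (List Int) → List (List Int)
  | [], _ => []
  | x :: c, rest =>
    if rest.any (·.isEmpty) then []
    else (x :: rest.map (·.head!)) :: zipAux c (rest.map (·.tail))

-- zip(*lists) for a list of lists (Python zip; zip() of no lists yields nothing)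
def zipCols : List (List Int) → List (List Int)
  | [] => []
  | c :: rest => zipAux c rest

def build_ngrams_alt (seq : List Int) (N : Int) : List (List Int) :=
  let size : Int := seq.length - N + 1
  if size < 1 then []
  else zipCols ((PySem.List.pyRange 0 N 1).map
    -- the view (seq[j] for j in range(i, len(seq))); j is always a valid index, so the
    -- default of pyGetD is never used
    (fun i => (PySem.List.pyRange i seq.length 1).map (fun j => PySem.List.pyGetD seq j 0)))

-- ===== PRECONDITION & SPEC =====
-- For N ≤ 0 A returns len(seq)-N+1 degenerate tuples (empty or clamped slices, an artefact of
-- Python slice clamping), while B returns [], the intended 'no N-grams for non-positive N' answer.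
def D_build_ngrams (seq : List Int) (N : Int) : Prop := N ≤ 0
instance (seq : List Int) (N : Int) : Decidable (D_build_ngrams seq N) := by unfold D_build_ngrams; infer_instance
def Spec_build_ngrams (seq : List Int) (N : Int) (out : List (List Int)) : Prop := ¬ D_build_ngrams seq N → out = build_ngrams_alt seq N
instance (seq : List Int) (N : Int) (out : List (List Int)) : Decidable (Spec_build_ngrams seq N out) := by unfold Spec_build_ngrams; infer_instance
def pvDiffWitness_build_ngrams : List Int × Int := ([1, 2], 0)
def pvDiffWitnessOut_build_ngrams : (List (List Int)) × (List (List Int)) := ([[], [], []], [])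

-- ===== CLAIM (what is proved, stated in full; the proofs are below) =====
def Claim_unchanged_build_ngrams : Prop := ∀ (seq : List Int) (N : Int), Dom_build_ngrams seq N → Spec_build_ngrams seq N (build_ngrams seq N)
def Claim_changed_build_ngrams : Prop := Dom_build_ngrams (pvDiffWitness_build_ngrams.1) (pvDiffWitness_build_ngrams.2) ∧ D_build_ngrams (pvDiffWitness_build_ngrams.1) (pvDiffWitness_build_ngrams.2) ∧ build_ngrams (pvDiffWitness_build_ngrams.1) (pvDiffWitness_build_ngrams.2) = pvDiffWitnessOut_build_ngrams.1 ∧ build_ngrams_alt (pvDiffWitness_build_ngrams.1) (pvDiffWitness_build_ngrams.2) = pvDiffWitnessOut_build_ngrams.2 ∧ pvDiffWitnessOut_build_ngrams.1 ≠ pvDiffWitnessOut_build_ngrams.2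
def Claim_exact_build_ngrams : Prop := ∀ (seq : List Int) (N : Int), Dom_build_ngrams seq N → D_build_ngrams seq N → build_ngrams seq N ≠ build_ngrams_alt seq N

-- ===== LEMMAS AND PROOFS =====

-- heads of the shifted views give the first N-gram
lemma heads_drops (xs : List Int) (n : Nat) (hn : n ≤ xs.length) :
    (List.range n).map (fun k => (xs.drop k).head!) = xs.take n := by
  induction xs generalizing n with
  | nil =>
    have h0 : n = 0 := by simpa using hn
    subst h0; simp
  | cons x t ih =>
    rcases n with _ | m
    · simp
    · rw [List.range_succ_eq_map]
      simp only [List.map_cons, List.map_map]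
      simp only [List.length_cons, Nat.succ_le_succ_iff] at hn
      rw [List.take_succ_cons]
      congr 1
      · simpa [Function.comp] using ih m hn

-- zipping seq with its m further shifted views yields the (m+1)-grams
lemma zipAux_drops (seq : List Int) (m : Nat) :
    zipAux seq ((List.range m).map (fun k => seq.drop (k + 1))) =
      (List.range (seq.length - m)).map (fun k => (seq.drop k).take (m + 1)) := by
  induction seq generalizing m with
  | nil => simp [zipAux]
  | cons a s ih =>
    have hrest : ((List.range m).map (fun k => (a :: s).drop (k + 1))) =
        (List.range m).map (fun k => s.drop k) := by
      apply List.map_congr_left; intro k _; rfl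
    rw [hrest]
    by_cases hlen : s.length < m
    · rw [zipAux, if_pos]
      · have h0 : (a :: s).length - m = 0 := by simp only [List.length_cons]; omega
        rw [h0]; simp
      · simp only [List.any_map, List.any_eq_true]
        refine ⟨m - 1, by simp; omega, ?_⟩
        simp only [Function.comp, List.isEmpty_iff, List.drop_eq_nil_iff]
        omega
    · push Not at hlen
      rw [zipAux, if_neg]
      · simp only [List.map_map]
        have hhead : ((List.range m).map ((fun l => l.head!) ∘ fun k => s.drop k)) = s.take m :=
          heads_drops s m hlen
        have htails : ((List.range m).map ((fun l => l.tail) ∘ fun k => s.drop k)) =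
            (List.range m).map (fun k => s.drop (k + 1)) := by
          apply List.map_congr_left; intro k _
          simp only [Function.comp]
          rw [List.tail_drop]
        rw [hhead, htails, ih]
        have hL : (a :: s).length - m = (s.length - m) + 1 := by
          simp only [List.length_cons]; omega
        rw [hL, List.range_succ_eq_map]
        simp only [List.map_cons, List.map_map]
        congr 1
      · simp only [List.any_map, List.any_eq_true, not_exists, not_and]
        intro k hk
        simp only [Function.comp, List.isEmpty_iff, List.drop_eq_nil_iff]
        simp only [List.mem_range] at hk
        omega

-- A's foldl-of-appends as a map over the range of starts
lemma build_ngrams_eq_map (seq : List Int) (N : Int) (h : ¬ ((seq.length : Int) - N + 1 < 1)) :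
    build_ngrams seq N =
      (PySem.List.pyRange 0 ((seq.length : Int) - N + 1) 1).map
        (fun i => PySem.List.slice seq (some i) (some (i + N))) := by
  unfold build_ngrams
  simp only [if_neg h]
  exact PySem.List.foldl_append_singleton_eq_map
    (f := fun i => PySem.List.slice seq (some i) (some (i + N)))
    (l := PySem.List.pyRange 0 ((seq.length : Int) - N + 1) 1) []

theorem build_ngrams_spec : Claim_unchanged_build_ngrams := by
  intro seq N _
  unfold Spec_build_ngrams D_build_ngrams
  intro h
  push Not at h
  lift N to ℕ using (by omega : (0:Int) ≤ N) with n
  have hn : 1 ≤ n := by exact_mod_cast h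
  by_cases hsz : ((seq.length : Int) - n + 1 < 1)
  · unfold build_ngrams build_ngrams_alt
    simp only [if_pos hsz]
  · rw [build_ngrams_eq_map seq n hsz]
    unfold build_ngrams_alt
    simp only [if_neg hsz]
    have hviews : ((PySem.List.pyRange 0 (n : Int) 1).map
          (fun i => (PySem.List.pyRange i seq.length 1).map (fun j => PySem.List.pyGetD seq j 0))) =
        (List.range n).map (fun k => seq.drop k) := by
      rw [PySem.List.pyRange_one, List.map_map]
      simp only [Int.sub_zero, Int.toNat_natCast]
      apply List.map_congr_left
      intro k _
      simp only [Function.comp, Int.zero_add]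
      rw [PySem.List.map_pyGetD_pyRange' seq 0 (by positivity : (0:Int) ≤ (k : Nat))]
      simp
    rw [hviews]
    obtain ⟨m, rfl⟩ : ∃ m, n = m + 1 := ⟨n - 1, by omega⟩
    rw [List.range_succ_eq_map]
    simp only [List.map_cons, List.drop_zero, List.map_map]
    have hshift : ((List.range m).map ((fun k => seq.drop k) ∘ Nat.succ)) =
        (List.range m).map (fun k => seq.drop (k + 1)) := by
      apply List.map_congr_left; intro k _; rfl
    rw [zipCols, hshift, zipAux_drops seq m]
    rw [PySem.List.pyRange_one, List.map_map]
    have hcnt : (((seq.length : Int) - (m + 1 : Nat) + 1) - 0).toNat = seq.length - m := by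
      push_cast; omega
    rw [hcnt]
    apply List.map_congr_left
    intro k hk
    simp only [Function.comp, Int.zero_add]
    have : ((k : Int) + ((m + 1 : Nat) : Int)) = ((k + (m + 1) : Nat) : Int) := by push_cast; ring
    rw [this, PySem.List.slice_natCast]
    congr 1
    omega

theorem build_ngrams_changed : Claim_changed_build_ngrams := by
  unfold Claim_changed_build_ngrams; decide

theorem build_ngrams_tight : Claim_exact_build_ngrams := by
  intro seq N _ hD
  unfold D_build_ngrams at hD
  have hlen : (0:Int) ≤ seq.length := by positivity
  have hsz : ¬ ((seq.length : Int) - N + 1 < 1) := by omega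
  intro heq
  rw [build_ngrams_eq_map seq N hsz] at heq
  unfold build_ngrams_alt at heq
  simp only [if_neg hsz] at heq
  rw [PySem.List.pyRange_one_eq_nil hD] at heq
  simp only [List.map_nil, zipCols] at heq
  rw [List.map_eq_nil_iff] at heq
  rw [PySem.List.pyRange_one_cons (by omega : (0:Int) < (seq.length : Int) - N + 1)] at heq
  simp at heq
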